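-- pv_equiv track=rewrite | github.com/mhamidjamil/airtable-scraper | airtable_manager/extract_patterns.py | clean_label
-- ===== SOURCE A (Python) =====
-- def clean_label(text: str) -> str:
--     """
--     Remove common field labels from text content
--     Labels: Explanation, Inner war / choice, Sources
--     """
--     if not text:
--         return ""
--
--     labels = [
--         "Explanation:",
--         "Inner war / choice:",
--         "Sources:",
--         "Explanation :",
--         "Inner war / choice :",
--         "Sources :"
--     ]
--
--     cleaned = text.strip()
--     for label in labels:
--         if cleaned.lower().startswith(label.lower()):
--             cleaned = cleaned[len(label):].strip()
--             break
--
--     return cleaned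
-- ===== SOURCE B (Python) =====
-- # B: instead of testing six label prefixes, locate the first colon once and
-- # classify the (lowercased) head before it against the three base labels.
-- LABELS = ("explanation", "inner war / choice", "sources")
--
--
-- def clean_label(text: str) -> str:
--     if not text:
--         return ""
--     s = text.strip()
--     i = s.find(':')
--     if i == -1:
--         return s
--     head = s[:i].lower()
--     if head in LABELS or (head.endswith(" ") and head[:-1] in LABELS):
--         return s[i + 1:].strip()
--     return s
-- ===== Notes on version B (the rewrite author's own statement) =====
-- stated objective: alternative
-- what changed: Replaces A's loop over six label-prefix variants with a single colon search: B finds the first colon and classifies the lowercased head before it against the three base labels.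
import Mathlib
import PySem

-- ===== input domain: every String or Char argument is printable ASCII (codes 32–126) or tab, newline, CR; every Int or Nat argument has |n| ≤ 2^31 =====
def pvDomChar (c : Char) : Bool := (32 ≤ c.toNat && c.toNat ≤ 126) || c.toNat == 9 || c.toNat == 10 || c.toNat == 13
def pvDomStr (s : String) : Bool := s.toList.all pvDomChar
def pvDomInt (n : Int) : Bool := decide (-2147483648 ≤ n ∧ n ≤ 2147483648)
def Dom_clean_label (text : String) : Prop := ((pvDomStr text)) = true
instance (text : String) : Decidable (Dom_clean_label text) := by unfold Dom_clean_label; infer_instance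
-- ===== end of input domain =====

-- B replaces A's six-prefix loop by locating the first ':' once and classifying
-- the lowercased head before it against the three base labels (objective: alternative).

-- ===== PORT A =====
-- the 'for label in labels: … break' loop of A: first matching label wins
def clean_label_loop (labels : List String) (cleaned : String) : String :=
  match labels with
  | [] => cleaned
  | l :: ls =>
    if PySem.Str.startswith (PySem.Str.lower cleaned) (PySem.Str.lower l) then
      PySem.Str.strip (PySem.Str.slice cleaned (some (PySem.Str.len l)) none)
    else clean_label_loop ls cleaned

def clean_label (text : String) : String :=
  if text = "" then ""
  else
    clean_label_loop
      ["Explanation:", "Inner war / choice:", "Sources:",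
       "Explanation :", "Inner war / choice :", "Sources :"]
      (PySem.Str.strip text)

-- ===== PORT B =====
-- module-level constant LABELS of Source B
def clean_label_LABELS : List String := ["explanation", "inner war / choice", "sources"]

def clean_label_alt (text : String) : String :=
  if text = "" then ""
  else
    let s := PySem.Str.strip text
    let i := PySem.Str.find s ":"
    if i = -1 then s
    else
      let head := PySem.Str.lower (PySem.Str.slice s none (some i))
      if head ∈ clean_label_LABELS ∨
         (PySem.Str.endswith head " " = true ∧
          PySem.Str.slice head none (some (-1)) ∈ clean_label_LABELS) then
        PySem.Str.strip (PySem.Str.slice s (some (i + 1)) none)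
      else s

-- ===== PRECONDITION & SPEC =====
def Spec_clean_label (text : String) (out : String) : Prop := out = clean_label_alt text
instance (text : String) (out : String) : Decidable (Spec_clean_label text out) := by unfold Spec_clean_label; infer_instance

-- ===== CLAIM (what is proved, stated in full; the proofs are below) =====
def Claim_equal_clean_label : Prop := ∀ (text : String), Dom_clean_label text → Spec_clean_label text (clean_label text)

-- ===== LEMMAS AND PROOFS =====

-- lowering a character never produces ':' unless it already was ':'
theorem pv_lowerChar_colon (c : Char) (h : PySem.Chars.lowerChar c = ':') : c = ':' := by
  unfold PySem.Chars.lowerChar at h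
  split_ifs at h with hu
  · exfalso
    simp only [PySem.Chars.isupper, Bool.and_eq_true, decide_eq_true_eq] at hu
    obtain ⟨h1, h2⟩ := hu
    have h1' : ('A':Char).toNat ≤ c.toNat := h1
    have h2' : c.toNat ≤ ('Z':Char).toNat := h2
    have hA : ('A':Char).toNat = 65 := by decide
    have hZ : ('Z':Char).toNat = 90 := by decide
    have hv : (c.toNat + 32).isValidChar := by unfold Nat.isValidChar; left; omega
    have h3 := congrArg Char.toNat h
    rw [Char.toNat_ofNat, if_pos hv] at h3
    have hc : (':' : Char).toNat = 58 := by decide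
    omega
  · exact h

theorem pv_singleton_prefix (c : Char) (l : List Char) : [c] <+: l ↔ l.head? = some c := by
  cases l <;> simp [eq_comm]

-- if a label ℓ++[':'] (with ':' ∉ ℓ) is a prefix of w whose first ':' sits at n, then ℓ = w.take n
theorem pv_colon_prefix_unique {w ℓ : List Char} {n : ℕ} (hnc : ':' ∉ ℓ)
    (hpre : ℓ ++ [':'] <+: w) (hcol : w[n]? = some ':')
    (hbef : ∀ j < n, w[j]? ≠ some ':') : ℓ = w.take n := by
  obtain ⟨r, hr⟩ := hpre
  rw [List.append_assoc] at hr
  have hℓpre : ℓ <+: w := ⟨':' :: r, hr⟩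
  have hget : w[ℓ.length]? = some ':' := by
    rw [← hr, List.getElem?_append_right (Nat.le_refl _)]
    simp
  rcases lt_trichotomy ℓ.length n with h | h | h
  · exact absurd hget (hbef _ h)
  · rw [← h]; exact List.prefix_iff_eq_take.mp hℓpre
  · exfalso
    have hℓ : ℓ = w.take ℓ.length := List.prefix_iff_eq_take.mp hℓpre
    have : ℓ[n]? = some ':' := by
      rw [hℓ, List.getElem?_take_of_lt h]; exact hcol
    exact hnc (List.mem_of_getElem? this)

theorem pv_take_colon_prefix {w : List Char} {n : ℕ} (hcol : w[n]? = some ':') :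
    (w.take n ++ [':']) <+: w := by
  have h : w.take (n+1) = w.take n ++ [':'] := by
    rw [List.take_add_one, hcol]; rfl
  rw [← h]; exact List.take_prefix _ _

-- A's loop condition, read on the list side
theorem pv_sw_iff (s p : String) :
    (PySem.Str.startswith (PySem.Str.lower s) p = true) ↔
      p.toList <+: PySem.Chars.lower s.toList := by
  rw [PySem.Str.startswith_eq, PySem.Str.toList_lower, PySem.Chars.startswith_iff]

-- A's loop condition is false for a label hdp++':' whose head differs from the text's first-colon head
theorem pv_cond_false (s : String) (n : Nat)
    (hcol : (PySem.Chars.lower s.toList)[n]? = some ':')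
    (hbef : ∀ j < n, (PySem.Chars.lower s.toList)[j]? ≠ some ':')
    (p : String) (hdp : List Char) (hsplit : p.toList = hdp ++ [':']) (hnc : ':' ∉ hdp)
    (hne : hdp ≠ (PySem.Chars.lower s.toList).take n) :
    ¬ (PySem.Str.startswith (PySem.Str.lower s) p = true) := by
  rw [pv_sw_iff, hsplit]
  intro hpre
  exact hne (pv_colon_prefix_unique hnc hpre hcol hbef)

-- …and true for the label whose head is exactly the text's first-colon head
theorem pv_cond_true (s : String) (n : Nat)
    (hcol : (PySem.Chars.lower s.toList)[n]? = some ':')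
    (p : String) (hdp : List Char) (hsplit : p.toList = hdp ++ [':'])
    (heq : hdp = (PySem.Chars.lower s.toList).take n) :
    PySem.Str.startswith (PySem.Str.lower s) p = true := by
  rw [pv_sw_iff, hsplit, heq]
  exact pv_take_colon_prefix hcol

-- the central lemma: A's label loop computes exactly B's find-and-classify body
set_option maxHeartbeats 2000000 in
theorem pv_loop_eq (s : String) :
    clean_label_loop
      ["Explanation:", "Inner war / choice:", "Sources:",
       "Explanation :", "Inner war / choice :", "Sources :"] s =
    (let i := PySem.Str.find s ":"
     if i = -1 then s
     else
       let head := PySem.Str.lower (PySem.Str.slice s none (some i))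
       if head ∈ clean_label_LABELS ∨
          (PySem.Str.endswith head " " = true ∧
           PySem.Str.slice head none (some (-1)) ∈ clean_label_LABELS) then
         PySem.Str.strip (PySem.Str.slice s (some (i + 1)) none)
       else s) := by
  suffices h : clean_label_loop
      ["Explanation:", "Inner war / choice:", "Sources:",
       "Explanation :", "Inner war / choice :", "Sources :"] s =
    (if PySem.Str.find s ":" = -1 then s
     else
       if PySem.Str.lower (PySem.Str.slice s none (some (PySem.Str.find s ":"))) ∈ clean_label_LABELS ∨
          (PySem.Str.endswith (PySem.Str.lower (PySem.Str.slice s none (some (PySem.Str.find s ":")))) " " = true ∧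
           PySem.Str.slice (PySem.Str.lower (PySem.Str.slice s none (some (PySem.Str.find s ":")))) none (some (-1)) ∈ clean_label_LABELS) then
         PySem.Str.strip (PySem.Str.slice s (some (PySem.Str.find s ":" + 1)) none)
       else s) by exact h
  have hfind : PySem.Str.find s ":" = PySem.Chars.find s.toList [':'] := by
    rw [PySem.Str.find_eq, show (":" : String).toList = [':'] from by decide]
  by_cases hf : PySem.Str.find s ":" = -1
  · -- no colon in the text: no label matches, both sides return s
    rw [if_pos hf]
    have hmem : ':' ∉ s.toList := by
      intro hm
      obtain ⟨u, v, huv⟩ := List.append_of_mem hm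
      exact (PySem.Chars.find_eq_neg_one_iff s.toList [':']).mp (hfind ▸ hf)
        ⟨u, v, by simp [huv]⟩
    have hsw : ∀ p : String, ':' ∈ p.toList →
        ¬ (PySem.Str.startswith (PySem.Str.lower s) p = true) := by
      intro p hp hsw
      have hpre := (pv_sw_iff s p).mp hsw
      have hcl : ':' ∈ PySem.Chars.lower s.toList := List.Sublist.mem hp hpre.sublist
      obtain ⟨c, hc, hcl⟩ := List.mem_map.mp hcl
      exact hmem (pv_lowerChar_colon c hcl ▸ hc)
    simp only [clean_label_loop]
    rw [if_neg (hsw _ (by decide)), if_neg (hsw _ (by decide)), if_neg (hsw _ (by decide)),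
        if_neg (hsw _ (by decide)), if_neg (hsw _ (by decide)), if_neg (hsw _ (by decide))]
  · -- a first colon exists at index n
    rw [if_neg hf]
    have hf' : PySem.Chars.find s.toList [':'] ≠ -1 := by rwa [hfind] at hf
    have hzero : PySem.Chars.findFrom s.toList [':'] ((0:Nat):Int) = PySem.Chars.find s.toList [':'] := by
      rw [Nat.cast_zero, PySem.Chars.findFrom_zero]
    have hspec := PySem.Chars.findFrom_natCast_spec s.toList [':'] 0 (Nat.zero_le _)
      (by rw [hzero]; exact hf')
    rw [hzero] at hspec
    obtain ⟨h0, hpre, hmin⟩ := hspec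
    set f := PySem.Chars.find s.toList [':'] with hfdef
    set n := f.toNat with hn
    have hfn : f = (n:Int) := (Int.toNat_of_nonneg h0).symm
    have hcol : s.toList[n]? = some ':' := by
      rw [← List.head?_drop]; exact (pv_singleton_prefix ':' _).mp hpre
    have hbef : ∀ j < n, s.toList[j]? ≠ some ':' := by
      intro j hj hc
      exact hmin j (Nat.zero_le _) hj ((pv_singleton_prefix ':' _).mpr (List.head?_drop ▸ hc))
    have hnlen : n < s.toList.length := (List.getElem?_eq_some_iff.mp hcol).1
    have hlc : PySem.Chars.lowerChar ':' = ':' := by decide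
    have hlowcol : (PySem.Chars.lower s.toList)[n]? = some ':' := by
      unfold PySem.Chars.lower
      rw [List.getElem?_map, hcol, Option.map_some, hlc]
    have hlowbef : ∀ j < n, (PySem.Chars.lower s.toList)[j]? ≠ some ':' := by
      intro j hj hc
      unfold PySem.Chars.lower at hc
      rw [List.getElem?_map] at hc
      obtain ⟨c, hc1, hc2⟩ := Option.map_eq_some_iff.mp hc
      exact hbef j hj (by rw [hc1, pv_lowerChar_colon c hc2])
    have hheadlist : (PySem.Str.lower (PySem.Str.slice s none (some f))).toList
        = (PySem.Chars.lower s.toList).take n := by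
      rw [PySem.Str.toList_lower, PySem.Str.toList_slice, PySem.Chars.slice_eq_listSlice,
          PySem.List.slice_to _ h0]
      unfold PySem.Chars.lower
      rw [List.map_take, hn]
    have hhlen : ((PySem.Chars.lower s.toList).take n).length = n := by
      rw [List.length_take]
      have : (PySem.Chars.lower s.toList).length = s.toList.length := by
        unfold PySem.Chars.lower; rw [List.length_map]
      omega
    rw [hfind]
    set head := PySem.Str.lower (PySem.Str.slice s none (some f)) with hhead
    -- B's boolean condition amounts to: the lowercased head is one of the six label heads
    have hC1 : (head ∈ clean_label_LABELS ∨
        (PySem.Str.endswith head " " = true ∧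
         PySem.Str.slice head none (some (-1)) ∈ clean_label_LABELS)) ↔
        (head.toList = "explanation".toList ∨ head.toList = "inner war / choice".toList ∨
         head.toList = "sources".toList ∨ head.toList = "explanation ".toList ∨
         head.toList = "inner war / choice ".toList ∨ head.toList = "sources ".toList) := by
      constructor
      · rintro (hm | ⟨hend, hm⟩)
        · simp only [clean_label_LABELS, List.mem_cons, List.not_mem_nil, or_false] at hm
          rcases hm with h | h | h
          · exact Or.inl (congrArg String.toList h)
          · exact Or.inr (Or.inl (congrArg String.toList h))
          · exact Or.inr (Or.inr (Or.inl (congrArg String.toList h)))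
        · have hsuf : [' '] <:+ head.toList := by
            rw [PySem.Str.endswith_eq] at hend
            exact (PySem.Chars.endswith_iff head.toList (" ".toList)).mp hend
          obtain ⟨u, hu⟩ := hsuf
          have hdl : (PySem.Str.slice head none (some (-1))).toList = u := by
            rw [PySem.Str.toList_slice, PySem.Chars.slice_eq_listSlice,
                PySem.List.slice_to_neg_one, ← hu, List.dropLast_concat]
          simp only [clean_label_LABELS, List.mem_cons, List.not_mem_nil, or_false] at hm
          have hh : head.toList = u ++ [' '] := hu.symm
          rcases hm with h | h | h
          · refine Or.inr (Or.inr (Or.inr (Or.inl ?_)))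
            rw [hh, ← hdl, congrArg String.toList h]; decide
          · refine Or.inr (Or.inr (Or.inr (Or.inr (Or.inl ?_))))
            rw [hh, ← hdl, congrArg String.toList h]; decide
          · refine Or.inr (Or.inr (Or.inr (Or.inr (Or.inr ?_))))
            rw [hh, ← hdl, congrArg String.toList h]; decide
      · intro h
        rcases h with h | h | h | h | h | h
        · exact Or.inl (by rw [show head = "explanation" from String.toList_inj.mp h]; simp [clean_label_LABELS])
        · exact Or.inl (by rw [show head = "inner war / choice" from String.toList_inj.mp h]; simp [clean_label_LABELS])
        · exact Or.inl (by rw [show head = "sources" from String.toList_inj.mp h]; simp [clean_label_LABELS])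
        · refine Or.inr ⟨?_, ?_⟩
          · rw [show head = "explanation " from String.toList_inj.mp h]; decide
          · rw [show head = "explanation " from String.toList_inj.mp h]
            rw [show PySem.Str.slice "explanation " none (some (-1)) = "explanation" from by decide]
            simp [clean_label_LABELS]
        · refine Or.inr ⟨?_, ?_⟩
          · rw [show head = "inner war / choice " from String.toList_inj.mp h]; decide
          · rw [show head = "inner war / choice " from String.toList_inj.mp h]
            rw [show PySem.Str.slice "inner war / choice " none (some (-1)) = "inner war / choice" from by decide]
            simp [clean_label_LABELS]
        · refine Or.inr ⟨?_, ?_⟩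
          · rw [show head = "sources " from String.toList_inj.mp h]; decide
          · rw [show head = "sources " from String.toList_inj.mp h]
            rw [show PySem.Str.slice "sources " none (some (-1)) = "sources" from by decide]
            simp [clean_label_LABELS]
    by_cases hb : (head.toList = "explanation".toList ∨ head.toList = "inner war / choice".toList ∨
         head.toList = "sources".toList ∨ head.toList = "explanation ".toList ∨
         head.toList = "inner war / choice ".toList ∨ head.toList = "sources ".toList)
    · rw [if_pos (hC1.mpr hb)]
      simp only [clean_label_loop]
      rcases hb with h | h | h | h | h | h <;>
        [(have hhd : (PySem.Chars.lower s.toList).take n = "explanation".toList := by rw [← hheadlist, h]);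
         (have hhd : (PySem.Chars.lower s.toList).take n = "inner war / choice".toList := by rw [← hheadlist, h]);
         (have hhd : (PySem.Chars.lower s.toList).take n = "sources".toList := by rw [← hheadlist, h]);
         (have hhd : (PySem.Chars.lower s.toList).take n = "explanation ".toList := by rw [← hheadlist, h]);
         (have hhd : (PySem.Chars.lower s.toList).take n = "inner war / choice ".toList := by rw [← hheadlist, h]);
         (have hhd : (PySem.Chars.lower s.toList).take n = "sources ".toList := by rw [← hheadlist, h])]
      · have hnv : n = 11 := by rw [← hhlen, hhd]; decide
        rw [if_pos (pv_cond_true s n hlowcol (PySem.Str.lower "Explanation:") ("explanation".toList) (by decide) hhd.symm)]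
        rw [show PySem.Str.len "Explanation:" = (12:Int) from by decide,
            show f + 1 = (12:Int) from by omega]
      · have hnv : n = 18 := by rw [← hhlen, hhd]; decide
        rw [if_neg (pv_cond_false s n hlowcol hlowbef (PySem.Str.lower "Explanation:") ("explanation".toList) (by decide) (by decide) (by rw [hhd]; decide))]
        rw [if_pos (pv_cond_true s n hlowcol (PySem.Str.lower "Inner war / choice:") ("inner war / choice".toList) (by decide) hhd.symm)]
        rw [show PySem.Str.len "Inner war / choice:" = (19:Int) from by decide,
            show f + 1 = (19:Int) from by omega]
      · have hnv : n = 7 := by rw [← hhlen, hhd]; decide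
        rw [if_neg (pv_cond_false s n hlowcol hlowbef (PySem.Str.lower "Explanation:") ("explanation".toList) (by decide) (by decide) (by rw [hhd]; decide))]
        rw [if_neg (pv_cond_false s n hlowcol hlowbef (PySem.Str.lower "Inner war / choice:") ("inner war / choice".toList) (by decide) (by decide) (by rw [hhd]; decide))]
        rw [if_pos (pv_cond_true s n hlowcol (PySem.Str.lower "Sources:") ("sources".toList) (by decide) hhd.symm)]
        rw [show PySem.Str.len "Sources:" = (8:Int) from by decide,
            show f + 1 = (8:Int) from by omega]
      · have hnv : n = 12 := by rw [← hhlen, hhd]; decide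
        rw [if_neg (pv_cond_false s n hlowcol hlowbef (PySem.Str.lower "Explanation:") ("explanation".toList) (by decide) (by decide) (by rw [hhd]; decide))]
        rw [if_neg (pv_cond_false s n hlowcol hlowbef (PySem.Str.lower "Inner war / choice:") ("inner war / choice".toList) (by decide) (by decide) (by rw [hhd]; decide))]
        rw [if_neg (pv_cond_false s n hlowcol hlowbef (PySem.Str.lower "Sources:") ("sources".toList) (by decide) (by decide) (by rw [hhd]; decide))]
        rw [if_pos (pv_cond_true s n hlowcol (PySem.Str.lower "Explanation :") ("explanation ".toList) (by decide) hhd.symm)]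
        rw [show PySem.Str.len "Explanation :" = (13:Int) from by decide,
            show f + 1 = (13:Int) from by omega]
      · have hnv : n = 19 := by rw [← hhlen, hhd]; decide
        rw [if_neg (pv_cond_false s n hlowcol hlowbef (PySem.Str.lower "Explanation:") ("explanation".toList) (by decide) (by decide) (by rw [hhd]; decide))]
        rw [if_neg (pv_cond_false s n hlowcol hlowbef (PySem.Str.lower "Inner war / choice:") ("inner war / choice".toList) (by decide) (by decide) (by rw [hhd]; decide))]
        rw [if_neg (pv_cond_false s n hlowcol hlowbef (PySem.Str.lower "Sources:") ("sources".toList) (by decide) (by decide) (by rw [hhd]; decide))]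
        rw [if_neg (pv_cond_false s n hlowcol hlowbef (PySem.Str.lower "Explanation :") ("explanation ".toList) (by decide) (by decide) (by rw [hhd]; decide))]
        rw [if_pos (pv_cond_true s n hlowcol (PySem.Str.lower "Inner war / choice :") ("inner war / choice ".toList) (by decide) hhd.symm)]
        rw [show PySem.Str.len "Inner war / choice :" = (20:Int) from by decide,
            show f + 1 = (20:Int) from by omega]
      · have hnv : n = 8 := by rw [← hhlen, hhd]; decide
        rw [if_neg (pv_cond_false s n hlowcol hlowbef (PySem.Str.lower "Explanation:") ("explanation".toList) (by decide) (by decide) (by rw [hhd]; decide))]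
        rw [if_neg (pv_cond_false s n hlowcol hlowbef (PySem.Str.lower "Inner war / choice:") ("inner war / choice".toList) (by decide) (by decide) (by rw [hhd]; decide))]
        rw [if_neg (pv_cond_false s n hlowcol hlowbef (PySem.Str.lower "Sources:") ("sources".toList) (by decide) (by decide) (by rw [hhd]; decide))]
        rw [if_neg (pv_cond_false s n hlowcol hlowbef (PySem.Str.lower "Explanation :") ("explanation ".toList) (by decide) (by decide) (by rw [hhd]; decide))]
        rw [if_neg (pv_cond_false s n hlowcol hlowbef (PySem.Str.lower "Inner war / choice :") ("inner war / choice ".toList) (by decide) (by decide) (by rw [hhd]; decide))]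
        rw [if_pos (pv_cond_true s n hlowcol (PySem.Str.lower "Sources :") ("sources ".toList) (by decide) hhd.symm)]
        rw [show PySem.Str.len "Sources :" = (9:Int) from by decide,
            show f + 1 = (9:Int) from by omega]
    · rw [if_neg (fun hbc => hb (hC1.mp hbc))]
      have hneH : ∀ hdp : List Char, (hdp = "explanation".toList ∨ hdp = "inner war / choice".toList ∨
          hdp = "sources".toList ∨ hdp = "explanation ".toList ∨
          hdp = "inner war / choice ".toList ∨ hdp = "sources ".toList) →
          hdp ≠ (PySem.Chars.lower s.toList).take n := by
        intro hdp hin he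
        apply hb
        rw [hheadlist, ← he]
        exact hin
      simp only [clean_label_loop]
      rw [if_neg (pv_cond_false s n hlowcol hlowbef (PySem.Str.lower "Explanation:") ("explanation".toList) (by decide) (by decide) (hneH _ (Or.inl rfl))),
          if_neg (pv_cond_false s n hlowcol hlowbef (PySem.Str.lower "Inner war / choice:") ("inner war / choice".toList) (by decide) (by decide) (hneH _ (Or.inr (Or.inl rfl)))),
          if_neg (pv_cond_false s n hlowcol hlowbef (PySem.Str.lower "Sources:") ("sources".toList) (by decide) (by decide) (hneH _ (Or.inr (Or.inr (Or.inl rfl))))),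
          if_neg (pv_cond_false s n hlowcol hlowbef (PySem.Str.lower "Explanation :") ("explanation ".toList) (by decide) (by decide) (hneH _ (Or.inr (Or.inr (Or.inr (Or.inl rfl)))))),
          if_neg (pv_cond_false s n hlowcol hlowbef (PySem.Str.lower "Inner war / choice :") ("inner war / choice ".toList) (by decide) (by decide) (hneH _ (Or.inr (Or.inr (Or.inr (Or.inr (Or.inl rfl))))))),
          if_neg (pv_cond_false s n hlowcol hlowbef (PySem.Str.lower "Sources :") ("sources ".toList) (by decide) (by decide) (hneH _ (Or.inr (Or.inr (Or.inr (Or.inr (Or.inr rfl)))))))]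

-- ===== VERDICT (by name: the statement is the Claim_ definition above) =====
theorem clean_label_spec : Claim_equal_clean_label := by
  unfold Claim_equal_clean_label Spec_clean_label
  intro text _
  unfold clean_label clean_label_alt
  by_cases h0 : text = ""
  · simp [h0]
  · simp only [if_neg h0]
    exact pv_loop_eq (PySem.Str.strip text)
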